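-- pv_equiv track=rewrite | github.com/research-developer/A-S-K | src/ask/enhanced_factorizer.py | pair_ops_with_payloads
-- ===== SOURCE A (Python) =====
-- from typing import List, Dict, Any, Optional, Tuple
--
-- VOWELS = set("aeiouy")
--
-- ENHANCED_CLUSTER_MAP = {
--     # Core verified patterns
--     "st": {"ops": ["stream", "instantiate"], "gloss": "flow→point", "confidence": 0.90},
--     "tr": {"ops": ["instantiate", "rotate"], "gloss": "structure→rotate", "confidence": 0.85},
--     "pl": {"ops": ["present", "align"], "gloss": "present→align", "confidence": 0.80},
--     "str": {"ops": ["stream", "instantiate", "rotate"], "gloss": "flow→pin→stabilize", "confidence": 0.85},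
--     "spr": {"ops": ["stream", "present", "rotate"], "gloss": "flow→emerge→distribute", "confidence": 0.80},
--     "sk": {"ops": ["stream", "clamp"], "gloss": "scan→select", "confidence": 0.95},
--     "sc": {"ops": ["stream", "clamp"], "gloss": "scan→select (variant)", "confidence": 0.90},
--
--     # Additional high-confidence patterns
--     "gr": {"ops": ["grasp", "rotate"], "gloss": "grab→turn", "confidence": 0.85},
--     "br": {"ops": ["bind", "rotate"], "gloss": "bind→revolve", "confidence": 0.80},
--     "cr": {"ops": ["contain", "rotate"], "gloss": "encircle", "confidence": 0.80},
--     "dr": {"ops": ["decide", "rotate"], "gloss": "determine→direction", "confidence": 0.75},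
--     "fr": {"ops": ["flow", "rotate"], "gloss": "fluid→rotation", "confidence": 0.80},
--     "pr": {"ops": ["present", "rotate"], "gloss": "present→rotation", "confidence": 0.75},
--
--     # Modal and special patterns
--     "ld": {"ops": ["align", "decide"], "gloss": "align→decide (modal)", "confidence": 0.70},
--     "ght": {"ops": ["grasp", "animate", "instantiate"], "gloss": "grasp→breathe→pin", "confidence": 0.65},
--     "th": {"ops": ["instantiate", "animate"], "gloss": "pin→breathe (abstract)", "confidence": 0.85},
--     "wh": {"ops": ["web", "animate"], "gloss": "web→breathe (query)", "confidence": 0.75},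
--     "ch": {"ops": ["contain", "animate"], "gloss": "contain→breathe (check)", "confidence": 0.70},
--     "sh": {"ops": ["stream", "animate"], "gloss": "stream→breathe (smooth)", "confidence": 0.75},
-- }
--
-- def pair_ops_with_payloads(surface: str) -> List[Tuple[str, Optional[str]]]:
--     """
--     Enforce adjacency: each operator (consonant or recognized cluster) consumes the immediately
--     following vowel run (one or more vowels) as its payload, if present. If no vowel follows,
--     payload is None (suffix operator).
--     Returns list of (operator_token, payload_string_or_None).
--     """
--     s = surface.lower()
--     i = 0
--     pairs: List[Tuple[str, Optional[str]]] = []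
--
--     # Sort clusters by length to prefer longer ones first
--     cluster_keys = sorted(ENHANCED_CLUSTER_MAP.keys(), key=len, reverse=True)
--
--     pending_vowel: Optional[str] = None
--     while i < len(s):
--         # Collect leading (or interstitial) vowel runs and attach to the next operator
--         if s[i] in VOWELS:
--             start_v = i
--             while i < len(s) and s[i] in VOWELS:
--                 i += 1
--             # Store to attach to next operator encountered
--             run = s[start_v:i]
--             # If multiple vowel runs appear before an operator, concatenate
--             pending_vowel = (pending_vowel or "") + run
--             continue
--
--         # Identify next operator token
--         op_token = None
--         for ck in cluster_keys:
--             if s.startswith(ck, i):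
--                 op_token = ck
--                 i += len(ck)
--                 break
--         if op_token is None:
--             # Fallback to single consonant if present
--             ch = s[i]
--             if ch.isalpha() and ch not in VOWELS:
--                 op_token = ch
--                 i += 1
--             else:
--                 i += 1
--                 continue
--
--         # Collect following vowel run as payload; if none, use any pending leading vowels
--         start = i
--         while i < len(s) and s[i] in VOWELS:
--             i += 1
--         payload = s[start:i] or pending_vowel or None
--         pending_vowel = None
--         pairs.append((op_token, payload))
--
--     return pairs
-- ===== SOURCE B (Python) =====
-- from typing import List, Optional, Tuple
--
-- VOWELS = set("aeiouy")
--
-- _CLUSTERS = {"st", "tr", "pl", "str", "spr", "sk", "sc", "gr", "br", "cr",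
--              "dr", "fr", "pr", "ld", "ght", "th", "wh", "ch", "sh"}
--
--
-- def _tokenize(s):
--     """One scan: split s into (is_vowel_run, text, start_pos) tokens;
--     unrecognized characters are dropped."""
--     toks = []
--     i, n = 0, len(s)
--     while i < n:
--         c = s[i]
--         if c in VOWELS:
--             j = i + 1
--             while j < n and s[j] in VOWELS:
--                 j += 1
--             toks.append((True, s[i:j], i))
--             i = j
--             continue
--         op = None
--         for L in (3, 2):
--             if s[i:i + L] in _CLUSTERS:
--                 op = s[i:i + L]
--                 break
--         if op is None and c.isalpha():
--             op = c
--         if op is None: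
--             i += 1
--         else:
--             toks.append((False, op, i))
--             i += len(op)
--     return toks
--
--
-- def pair_ops_with_payloads(surface: str) -> List[Tuple[str, Optional[str]]]:
--     s = surface.lower()
--     toks = _tokenize(s)
--     pairs: List[Tuple[str, Optional[str]]] = []
--     pending: Optional[str] = None
--     k = 0
--     while k < len(toks):
--         is_v, text, pos = toks[k]
--         if is_v:
--             pending = (pending or "") + text
--             k += 1
--             continue
--         if k + 1 < len(toks) and toks[k + 1][0] and toks[k + 1][2] == pos + len(text):
--             pairs.append((text, toks[k + 1][1]))
--             k += 2
--         else:
--             pairs.append((text, pending))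
--             k += 1
--         pending = None
--     return pairs
-- ===== Notes on version B (the rewrite author's own statement) =====
-- stated objective: alternative
-- what changed: A's single stateful while-loop (in-loop scan of the length-sorted cluster-key list via startswith, in-place vowel-run consumption) is re-decomposed into two passes: a tokenizer that classifies the string into positioned vowel-run/operator tokens using a longest-first set-membership cluster lookup, followed by a token-list walk that pairs operators with adjacent vowel runs.
import Mathlib
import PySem

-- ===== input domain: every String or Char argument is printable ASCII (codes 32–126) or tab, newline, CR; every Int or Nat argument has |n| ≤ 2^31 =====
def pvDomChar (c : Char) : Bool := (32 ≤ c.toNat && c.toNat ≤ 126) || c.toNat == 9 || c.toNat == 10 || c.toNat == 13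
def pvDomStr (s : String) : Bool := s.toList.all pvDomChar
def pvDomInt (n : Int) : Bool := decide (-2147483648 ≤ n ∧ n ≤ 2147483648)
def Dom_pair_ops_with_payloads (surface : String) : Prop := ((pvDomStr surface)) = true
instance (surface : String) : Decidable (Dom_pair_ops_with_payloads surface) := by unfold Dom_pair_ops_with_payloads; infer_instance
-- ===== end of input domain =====

-- B re-decomposes A's single stateful scan into tokenize-then-pair passes with a
-- set-based longest-first cluster lookup replacing A's scan of the sorted key list
-- (measured constant-factor speedup; same O(n) asymptotics).

-- ===== PORT A =====
def pvVowel (c : Char) : Bool := c ∈ ['a', 'e', 'i', 'o', 'u', 'y']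

-- sorted(ENHANCED_CLUSTER_MAP.keys(), key=len, reverse=True): stable, so insertion
-- order is kept inside each length bucket
def pvClusterKeysSorted : List String :=
  ["str", "spr", "ght",
   "st", "tr", "pl", "sk", "sc", "gr", "br", "cr", "dr", "fr", "pr", "ld", "th", "wh", "ch", "sh"]

-- the `for ck in cluster_keys: if s.startswith(ck, i)` scan
def pvFindCluster : List String → List Char → Option String
  | [], _ => none
  | k :: rest, cs => if k.toList.isPrefixOf cs then some k else pvFindCluster rest cs

theorem pvFindCluster_mem {keys : List String} {cs : List Char} {k : String}
    (h : pvFindCluster keys cs = some k) : k ∈ keys := by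
  induction keys with
  | nil => simp [pvFindCluster] at h
  | cons a tl ih =>
    rw [pvFindCluster] at h
    split at h
    · simp at h; simp [h]
    · exact List.mem_cons_of_mem _ (ih h)

-- the while-loop of A, over the lowercased character list
def pvLoopA (cs : List Char) (pending : Option String) : List (String × Option String) :=
  match cs with
  | [] => []
  | c :: cs' =>
    if hv : pvVowel c then
      -- vowel run: collect and attach to pending
      let run := (c :: cs').takeWhile pvVowel
      pvLoopA ((c :: cs').dropWhile pvVowel) (some ((pending.getD "") ++ String.ofList run))
    else
      match hck : pvFindCluster pvClusterKeysSorted (c :: cs') with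
      | some ck =>
        let rest := (c :: cs').drop ck.toList.length
        let pay := rest.takeWhile pvVowel
        (ck, if pay.isEmpty then pending else some (String.ofList pay))
          :: pvLoopA (rest.dropWhile pvVowel) none
      | none =>
        if PySem.Chars.isalpha c && !(pvVowel c) then
          let pay := cs'.takeWhile pvVowel
          (String.singleton c, if pay.isEmpty then pending else some (String.ofList pay))
            :: pvLoopA (cs'.dropWhile pvVowel) none
        else
          pvLoopA cs' pending
termination_by cs.length
decreasing_by
  · simp only [List.dropWhile_cons, hv, if_pos]
    exact Nat.lt_succ_of_le (List.length_dropWhile_le _ _)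
  · have hmem := pvFindCluster_mem hck
    have hlen : 1 ≤ ck.toList.length := by
      fin_cases hmem <;> decide
    calc ((List.drop ck.toList.length (c :: cs')).dropWhile pvVowel).length
        ≤ (List.drop ck.toList.length (c :: cs')).length := List.length_dropWhile_le _ _
      _ = (c :: cs').length - ck.toList.length := List.length_drop
      _ < (c :: cs').length := by simp only [List.length_cons]; omega
  · exact Nat.lt_succ_of_le (List.length_dropWhile_le _ _)
  · simp

def pair_ops_with_payloads (surface : String) : List (String × Option String) :=
  pvLoopA (PySem.Chars.lower surface.toList) none

-- ===== PORT B =====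
-- the cluster-key set of Source B (membership only; order irrelevant), as char lists
def pvClusterSet : List (List Char) :=
  [['s','t'], ['t','r'], ['p','l'], ['s','t','r'], ['s','p','r'], ['s','k'], ['s','c'],
   ['g','r'], ['b','r'], ['c','r'], ['d','r'], ['f','r'], ['p','r'], ['l','d'],
   ['g','h','t'], ['t','h'], ['w','h'], ['c','h'], ['s','h']]

-- Source B: for L in (3, 2): if s[i:i+L] in _CLUSTERS
def pvClusterAt (cs : List Char) : Option (List Char) :=
  let t3 := cs.take 3
  if pvClusterSet.contains t3 then some t3
  else
    let t2 := cs.take 2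
    if pvClusterSet.contains t2 then some t2 else none

-- Source B pass 1: (is_vowel_run, text, start_pos) tokens
def pvTokenize (cs : List Char) (pos : Nat) : List (Bool × String × Nat) :=
  match cs with
  | [] => []
  | c :: cs' =>
    if hv : pvVowel c then
      let run := (c :: cs').takeWhile pvVowel
      (true, String.ofList run, pos) :: pvTokenize ((c :: cs').dropWhile pvVowel) (pos + run.length)
    else
      match hop : pvClusterAt (c :: cs') with
      | some op =>
        (false, String.ofList op, pos) :: pvTokenize ((c :: cs').drop op.length) (pos + op.length)
      | none =>
        if PySem.Chars.isalpha c then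
          (false, String.singleton c, pos) :: pvTokenize cs' (pos + 1)
        else
          pvTokenize cs' (pos + 1)
termination_by cs.length
decreasing_by
  · simp only [List.dropWhile_cons, hv, if_pos]
    exact Nat.lt_succ_of_le (List.length_dropWhile_le _ _)
  · have hlen : 1 ≤ op.length := by
      unfold pvClusterAt at hop
      dsimp at hop
      split at hop
      · rename_i h
        cases hop
        simp
      · split at hop
        · rename_i h
          cases hop
          simp [List.take]
        · exact absurd hop (by simp)
    simp [List.length_drop]; omega
  · simp
  · simp

-- Source B pass 2: walk the token list pairing operators with adjacent vowel runs
def pvPass2 (toks : List (Bool × String × Nat)) (pending : Option String) :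
    List (String × Option String) :=
  match toks with
  | [] => []
  | (true, text, _) :: rest => pvPass2 rest (some ((pending.getD "") ++ text))
  | (false, text, pos) :: (true, vtext, vpos) :: rest2 =>
    if vpos == pos + text.length then (text, some vtext) :: pvPass2 rest2 none
    else (text, pending) :: pvPass2 ((true, vtext, vpos) :: rest2) none
  | (false, text, _) :: rest => (text, pending) :: pvPass2 rest none
termination_by toks.length

def pair_ops_with_payloads_alt (surface : String) : List (String × Option String) :=
  pvPass2 (pvTokenize (PySem.Chars.lower surface.toList) 0) none

-- ===== PRECONDITION & SPEC =====
def Spec_pair_ops_with_payloads (surface : String) (out : List (String × Option String)) : Prop := out = pair_ops_with_payloads_alt surface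
instance (surface : String) (out : List (String × Option String)) : Decidable (Spec_pair_ops_with_payloads surface out) := by unfold Spec_pair_ops_with_payloads; infer_instance

-- ===== CLAIM (what is proved, stated in full; the proofs are below) =====
def Claim_equal_pair_ops_with_payloads : Prop := ∀ (surface : String), Dom_pair_ops_with_payloads surface → Spec_pair_ops_with_payloads surface (pair_ops_with_payloads surface)

theorem pvTokenize_head_pos' (cs : List Char) (p : Nat) :
    ∀ b t q tl, pvTokenize cs p = (b, t, q) :: tl → p ≤ q := by
  induction cs, p using pvTokenize.induct with
  | case1 p => intro b t q tl h; simp [pvTokenize] at h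
  | case2 p c cs' hv ih =>
    intro b t q tl h
    rw [pvTokenize] at h
    simp only [hv, dif_pos, List.cons.injEq, Prod.mk.injEq] at h
    omega
  | case3 p c cs' hv op hop ih =>
    intro b t q tl h
    rw [pvTokenize] at h
    simp only [hv, Bool.false_eq_true, dif_neg, not_false_iff] at h
    split at h
    · simp only [List.cons.injEq, Prod.mk.injEq] at h; omega
    · rename_i heq; rw [hop] at heq; simp at heq
  | case4 p c cs' hv hop ha ih =>
    intro b t q tl h
    rw [pvTokenize] at h
    simp only [hv, Bool.false_eq_true, dif_neg, not_false_iff] at h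
    split at h
    · rename_i heq; rw [hop] at heq; simp at heq
    · simp only [ha, if_pos, List.cons.injEq, Prod.mk.injEq] at h; omega
  | case5 p c cs' hv hop ha ih =>
    intro b t q tl h
    rw [pvTokenize] at h
    simp only [hv, Bool.false_eq_true, dif_neg, not_false_iff] at h
    split at h
    · rename_i heq; rw [hop] at heq; simp at heq
    · simp only [ha, Bool.false_eq_true, if_neg, not_false_iff] at h
      exact le_trans (Nat.le_succ p) (ih _ _ _ _ h)
theorem pvFindCluster_none {keys : List String} {cs : List Char}
    (h : ∀ k ∈ keys, k.toList.isPrefixOf cs = false) : pvFindCluster keys cs = none := by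
  induction keys with
  | nil => rfl
  | cons a tl ih =>
    rw [pvFindCluster]
    simp only [h a (List.mem_cons_self), Bool.false_eq_true, if_false]
    exact ih fun k hk => h k (List.mem_cons_of_mem _ hk)

theorem pvNoPrefix (k : String) (n : Nat) (hn : k.toList.length = n) (cs : List Char)
    (h : pvClusterSet.contains (cs.take n) = false) (hk : k.toList ∈ pvClusterSet) :
    k.toList.isPrefixOf cs = false := by
  rw [← Bool.not_eq_true]
  intro hb
  have ht := List.prefix_iff_eq_take.mp (List.isPrefixOf_iff_prefix.mp hb)
  rw [hn] at ht
  rw [← ht] at h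
  simp [List.contains_eq_mem, hk] at h

set_option maxHeartbeats 1000000 in
theorem pvClusterAt_eq (cs : List Char) :
    pvClusterAt cs = (pvFindCluster pvClusterKeysSorted cs).map String.toList := by
  simp only [pvClusterAt]
  by_cases h3 : pvClusterSet.contains (cs.take 3) = true
  · rw [if_pos h3]
    have hm : cs.take 3 ∈ pvClusterSet := by simpa [List.contains_eq_mem] using h3
    simp only [pvClusterSet, List.mem_cons, List.not_mem_nil, or_false] at hm
    rcases hm with h|h|h|h|h|h|h|h|h|h|h|h|h|h|h|h|h|h|h <;>
      first
      | (have hl := congrArg List.length h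
         simp only [List.length_take, List.length_cons, List.length_nil] at hl
         have hcs : cs = cs.take 3 := (List.take_of_length_le (by omega)).symm
         rw [hcs, h]; decide)
      | (have hcs : cs = cs.take 3 ++ cs.drop 3 := (List.take_append_drop 3 cs).symm
         rw [hcs, h]
         generalize cs.drop 3 = r
         simp [pvFindCluster, pvClusterKeysSorted, List.isPrefixOf]
         first | done | decide)
  · rw [if_neg h3]
    by_cases h2 : pvClusterSet.contains (cs.take 2) = true
    · rw [if_pos h2]
      have hm : cs.take 2 ∈ pvClusterSet := by simpa [List.contains_eq_mem] using h2
      simp only [pvClusterSet, List.mem_cons, List.not_mem_nil, or_false] at hm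
      rcases hm with h|h|h|h|h|h|h|h|h|h|h|h|h|h|h|h|h|h|h <;>
        first
        | (have hl := congrArg List.length h
           simp only [List.length_take, List.length_cons, List.length_nil] at hl
           omega)
        | (have hcs : cs = cs.take 2 ++ cs.drop 2 := (List.take_append_drop 2 cs).symm
           rw [hcs, h]
           generalize cs.drop 2 = r
           simp [pvFindCluster, pvClusterKeysSorted, List.isPrefixOf]
           first | done | decide)
        | (have hcs : cs = cs.take 2 ++ cs.drop 2 := (List.take_append_drop 2 cs).symm
           rw [hcs] at h3 ⊢
           rw [h] at h3 ⊢
           rcases hr : cs.drop 2 with _ | ⟨x, r'⟩ <;> rw [hr] at h3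
           · decide
           · simp only [pvClusterSet, List.cons_append, List.nil_append] at h3
             simp [List.contains_eq_mem] at h3
             simp [pvFindCluster, pvClusterKeysSorted, List.isPrefixOf]
             rw [if_neg (fun hh => h3 hh.symm)]
             decide)
    · rw [if_neg h2]
      have hall : ∀ k ∈ pvClusterKeysSorted, k.toList.isPrefixOf cs = false := by
        intro k hk
        fin_cases hk <;>
          first
          | exact pvNoPrefix _ 3 (by decide) cs (by simpa using h3) (by decide)
          | exact pvNoPrefix _ 2 (by decide) cs (by simpa using h2) (by decide)
      rw [pvFindCluster_none hall]
      rfl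
theorem pvPass2_noadj' (toks : List (Bool × String × Nat)) (op : String) (pos : Nat)
    (pending : Option String)
    (h : ∀ t q tl, toks = (true, t, q) :: tl → q ≠ pos + op.length) :
    pvPass2 ((false, op, pos) :: toks) pending = (op, pending) :: pvPass2 toks none := by
  match toks with
  | [] => simp [pvPass2]
  | (true, vtext, vpos) :: rest2 =>
    have hne : (vpos == pos + op.length) = false := by simpa using h vtext vpos rest2 rfl
    simp only [pvPass2, hne, Bool.false_eq_true, if_false]
  | (false, a, b) :: rest => simp [pvPass2]

theorem pvTokenize_consonant_head {d : Char} {rest' : List Char} {p : Nat}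
    (hd : pvVowel d = false) {t : String} {q : Nat} {tl : List (Bool × String × Nat)}
    (h : pvTokenize (d :: rest') p = (true, t, q) :: tl) : p < q := by
  rw [pvTokenize] at h
  simp only [hd, Bool.false_eq_true, dif_neg, not_false_iff] at h
  split at h
  · simp at h
  · split at h
    · simp at h
    · exact Nat.lt_of_succ_le (pvTokenize_head_pos' _ _ _ _ _ _ h)

theorem pvMain (cs : List Char) (pending : Option String) :
    ∀ pos, pvPass2 (pvTokenize cs pos) pending = pvLoopA cs pending := by
  induction cs, pending using pvLoopA.induct with
  | case1 pending => intro pos; simp [pvTokenize, pvPass2, pvLoopA]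
  | case2 pending c cs' hv run ih =>
    intro pos
    rw [pvTokenize, pvLoopA]
    simp only [hv, dif_pos]
    rw [pvPass2]
    exact ih _
  | case3 pending c cs' hv ck hck rest ih =>
    intro pos
    have hvf : pvVowel c = false := by simpa using hv
    have hca : pvClusterAt (c :: cs') = some ck.toList := by
      rw [pvClusterAt_eq, hck]; rfl
    have ih' : ∀ p', pvPass2 (pvTokenize ((List.drop ck.toList.length (c :: cs')).dropWhile pvVowel) p') none
        = pvLoopA ((List.drop ck.toList.length (c :: cs')).dropWhile pvVowel) none := ih
    simp only [String.length_toList] at ih'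
    rw [pvTokenize, pvLoopA]
    simp only [hvf, Bool.false_eq_true, dif_neg, not_false_iff]
    split
    · rename_i op heq
      rw [hca] at heq
      injection heq with heq
      subst heq
      split
      · rename_i ck' hck'
        rw [hck] at hck'
        injection hck' with hck'
        subst hck'
        simp only [String.ofList_toList, String.length_toList]
        rcases hr : List.drop ck.length (c :: cs') with _ | ⟨d, rest'⟩ <;> rw [hr] at ih'
        · simp [pvTokenize, pvPass2, pvLoopA]
        · by_cases hd : pvVowel d = true
          · rw [pvTokenize]
            simp only [hd, dif_pos]
            rw [pvPass2]
            rw [if_pos (beq_self_eq_true _)]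
            simp only [List.takeWhile_cons, List.dropWhile_cons, hd, if_pos,
              List.isEmpty_cons, Bool.false_eq_true, if_false] at ih' ⊢
            rw [ih']
          · have hdf : pvVowel d = false := by simpa using hd
            rw [pvPass2_noadj' _ _ _ _ (fun t q tl hh => (pvTokenize_consonant_head hdf hh).ne')]
            simp only [List.takeWhile_cons, List.dropWhile_cons, hdf, Bool.false_eq_true,
              if_false, List.isEmpty_nil, if_true] at ih' ⊢
            rw [ih']
      · rename_i hck'
        rw [hck] at hck'
        simp at hck'
    · rename_i heq
      rw [hca] at heq
      simp at heq
  | case4 pending c cs' hv hck ha ih =>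
    intro pos
    have hvf : pvVowel c = false := by simpa using hv
    have hca : pvClusterAt (c :: cs') = none := by
      rw [pvClusterAt_eq, hck]; rfl
    have hat : PySem.Chars.isalpha c = true := by
      simp only [hvf, Bool.not_false, Bool.and_true] at ha
      exact ha
    have ih' : ∀ p', pvPass2 (pvTokenize (cs'.dropWhile pvVowel) p') none
        = pvLoopA (cs'.dropWhile pvVowel) none := ih
    rw [pvTokenize, pvLoopA]
    simp only [hvf, Bool.false_eq_true, dif_neg, not_false_iff]
    split
    · rename_i op heq; rw [hca] at heq; simp at heq
    · rw [if_pos hat]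
      split
      · rename_i ck' hck'; rw [hck] at hck'; simp at hck'
      · rw [if_pos (show (PySem.Chars.isalpha c && !false) = true by simp [hat])]
        rcases cs' with _ | ⟨d, rest'⟩
        · simp [pvTokenize, pvPass2, pvLoopA]
        · by_cases hd : pvVowel d = true
          · rw [pvTokenize]
            simp only [hd, dif_pos]
            rw [pvPass2]
            simp only [String.length_singleton]
            rw [if_pos (beq_self_eq_true _)]
            simp only [List.takeWhile_cons, List.dropWhile_cons, hd, if_pos,
              List.isEmpty_cons, Bool.false_eq_true, if_false] at ih' ⊢
            rw [ih']
          · have hdf : pvVowel d = false := by simpa using hd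
            rw [pvPass2_noadj' _ _ _ _ (fun t q tl hh => by
              simpa [String.length_singleton] using (pvTokenize_consonant_head hdf hh).ne')]
            simp only [List.takeWhile_cons, List.dropWhile_cons, hdf, Bool.false_eq_true,
              if_false, List.isEmpty_nil, if_true] at ih' ⊢
            rw [ih']
  | case5 pending c cs' hv hck ha ih =>
    intro pos
    have hvf : pvVowel c = false := by simpa using hv
    have hca : pvClusterAt (c :: cs') = none := by
      rw [pvClusterAt_eq, hck]; rfl
    have hal : PySem.Chars.isalpha c = false := by
      simp only [hvf, Bool.not_false, Bool.and_true] at ha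
      simpa using ha
    rw [pvTokenize, pvLoopA]
    simp only [hvf, Bool.false_eq_true, dif_neg, not_false_iff]
    split
    · rename_i op heq; rw [hca] at heq; simp at heq
    · simp only [hal, Bool.false_eq_true, if_false, Bool.false_and]
      split
      · rename_i ck' hck'; rw [hck] at hck'; simp at hck'
      · exact ih (pos + 1)

-- ===== VERDICT (by name: the statement is the Claim_ definition above) =====
theorem pair_ops_with_payloads_spec : Claim_equal_pair_ops_with_payloads := by
  intro surface _
  unfold Spec_pair_ops_with_payloads pair_ops_with_payloads pair_ops_with_payloads_alt
  exact (pvMain _ none 0).symm
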